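-- pv_equiv track=rewrite | github.com/MatheusRuggeri/Connect4 | ConnectN (Terminal).py | conta_ligados
-- ===== SOURCE A (Python) =====
-- VAZIO   = ' '
--
-- MOLDURA = 'm'
--
-- def conta_ligados(tabuleiro, coluna):
--     lin = 1
--     direct = 1
--     i = 1; j = 1;
--     lig = 1
--     maxLig = 1
--     left = True
--     right = True
--     while (tabuleiro[lin][coluna] == MOLDURA or tabuleiro[lin][coluna] == VAZIO):
--         lin += 1
--     tipo = tabuleiro[lin][coluna]
--     while (direct <= 4):
--         if (right):
--             if (tabuleiro[lin+i][coluna+j] == tipo):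
--                 lig += 1
--             else:
--                 right = False
--         if (left):
--             if (tabuleiro[lin-i][coluna-j] == tipo):
--                 lig += 1
--             else:
--                 left = False
--         if (not left and not right):
--             left = True
--             right = True
--             direct += 1
--             i = 0
--             j = 0
--             if (lig > maxLig):
--                 maxLig = lig
--             lig = 1
--         if (direct == 1): # Diag -> \ <-
--             i += 1
--             j += 1
--         if (direct == 2): # Diag -> / <-
--             i -= 1
--             j += 1
--         if (direct == 3): # Col  -> | <-
--             i += 1
--         if (direct == 4): # Lin  -> - <-
--             j += 1
--     return maxLig
-- ===== SOURCE B (Python) =====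
-- VAZIO   = ' '
--
-- MOLDURA = 'm'
--
-- def conta_ligados(tabuleiro, coluna):
--     lin = 1
--     while tabuleiro[lin][coluna] == MOLDURA or tabuleiro[lin][coluna] == VAZIO:
--         lin += 1
--     tipo = tabuleiro[lin][coluna]
--
--     def ray(r, c, dr, dc):
--         # run length of tipo-cells starting at (r, c) along (dr, dc), recursively
--         if tabuleiro[r][c] != tipo:
--             return 0
--         return 1 + ray(r + dr, c + dc, dr, dc)
--
--     # stage 1: a table of the eight unit-ray run lengths around the landing cell
--     runs = {(dr, dc): ray(lin + dr, coluna + dc, dr, dc)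
--             for dr in (-1, 0, 1) for dc in (-1, 0, 1) if (dr, dc) != (0, 0)}
--     # stage 2: the answer is the centre plus the best opposite-ray pair
--     return 1 + max(runs[d] + runs[(-d[0], -d[1])]
--                    for d in ((1, 1), (-1, 1), (1, 0), (0, 1)))
-- ===== Notes on version B (the rewrite author's own statement) =====
-- stated objective: simpler
-- what changed: A's single interleaved while-loop over the state machine (direct counter, i/j offsets, left/right flags, lig/maxLig) is replaced by a staged decomposition: a recursive run-length helper fills a table of the eight unit-ray lengths around the landing cell, and the result is 1 plus the maximum opposite-pair sum; the column-drop loop and raw indexing are unchanged.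
import Mathlib
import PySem

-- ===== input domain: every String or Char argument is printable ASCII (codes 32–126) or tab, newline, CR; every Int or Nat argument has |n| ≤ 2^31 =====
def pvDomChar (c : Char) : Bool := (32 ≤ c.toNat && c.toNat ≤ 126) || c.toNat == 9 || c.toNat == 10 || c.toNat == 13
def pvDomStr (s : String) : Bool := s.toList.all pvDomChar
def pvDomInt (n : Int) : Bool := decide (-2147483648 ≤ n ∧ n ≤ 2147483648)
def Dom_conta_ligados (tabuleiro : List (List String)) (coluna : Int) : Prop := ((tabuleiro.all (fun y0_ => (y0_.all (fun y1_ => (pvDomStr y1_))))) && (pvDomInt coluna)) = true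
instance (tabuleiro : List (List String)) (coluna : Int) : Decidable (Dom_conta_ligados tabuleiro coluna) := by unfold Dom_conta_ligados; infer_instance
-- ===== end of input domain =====

-- B replaces A's interleaved four-direction flag/state machine by a staged decomposition:
-- a recursive run-length function fills a table of the eight unit-ray lengths, then the
-- answer is 1 + the best opposite-pair sum; objective: simpler, same cost.

-- ===== PORT A =====
-- tabuleiro[r][c] as an Option (none = IndexError), Python negative-index semantics
def cellA (tab : List (List String)) (r c : Int) : Option String :=
  (PySem.List.pyGet? tab r).bind (fun row => PySem.List.pyGet? row c)

-- the drop loop: while tabuleiro[lin][coluna] in {'m',' '}: lin += 1  (fuelled; fuel is a guard only)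
def dropA (tab : List (List String)) (coluna : Int) : Nat → Int → Option (Int × String)
  | 0, _ => none
  | fuel+1, lin =>
    match cellA tab lin coluna with
    | none => none
    | some u => if u = "m" ∨ u = " " then dropA tab coluna fuel (lin + 1) else some (lin, u)

-- one guarded probe: "if flag: if cell == tipo: lig += 1 else: flag = False"
def stepA (c : Option String) (tipo : String) (lig : Int) (flag : Bool) : Option (Int × Bool) :=
  if flag then
    match c with
    | none => none
    | some u => if u = tipo then some (lig + 1, true) else some (lig, false)
  else some (lig, flag)

-- the four sequential "if direct == d" increments at the bottom of A's loop body
def incA (direct i j : Int) : Int × Int :=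
  let p1 := if direct = 1 then (i + 1, j + 1) else (i, j)
  let p2 := if direct = 2 then (p1.1 - 1, p1.2 + 1) else p1
  let i3 := if direct = 3 then p2.1 + 1 else p2.1
  let j3 := if direct = 4 then p2.2 + 1 else p2.2
  (i3, j3)

-- A's main while loop, state (direct,i,j,lig,maxLig,left,right), transliterated
def loopA (tab : List (List String)) (coluna lin : Int) (tipo : String) :
    Nat → Int → Int → Int → Int → Int → Bool → Bool → Option Int
  | 0, _, _, _, _, _, _, _ => none
  | fuel+1, direct, i, j, lig, maxLig, left, right =>
    if direct ≤ 4 then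
      match stepA (cellA tab (lin + i) (coluna + j)) tipo lig right with
      | none => none
      | some (lig1, right1) =>
        match stepA (cellA tab (lin - i) (coluna - j)) tipo lig1 left with
        | none => none
        | some (lig2, left1) =>
          let st :=
            if !left1 && !right1 then
              (true, true, direct + 1, (0:Int), (0:Int),
               if lig2 > maxLig then lig2 else maxLig, (1:Int))
            else (left1, right1, direct, i, j, maxLig, lig2)
          let ij := incA st.2.2.1 st.2.2.2.1 st.2.2.2.2.1
          loopA tab coluna lin tipo fuel st.2.2.1 ij.1 ij.2 st.2.2.2.2.2.2 st.2.2.2.2.2.1 st.1 st.2.1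
    else some maxLig

def pvMaxRowA (tab : List (List String)) : Nat := (tab.map List.length).foldr Nat.max 0

def conta_ligados (tabuleiro : List (List String)) (coluna : Int) : Int :=
  match dropA tabuleiro coluna (tabuleiro.length + 2) 1 with
  | none => 0
  | some (lin, tipo) =>
    (loopA tabuleiro coluna lin tipo (32 * (tabuleiro.length + pvMaxRowA tabuleiro) + 100)
      1 1 1 1 1 true true).getD 0

-- ===== PORT B =====
def cellB (tab : List (List String)) (r c : Int) : Option String :=
  (PySem.List.pyGet? tab r).bind (fun row => PySem.List.pyGet? row c)

def dropB (tab : List (List String)) (coluna : Int) : Nat → Int → Option (Int × String)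
  | 0, _ => none
  | fuel+1, lin =>
    match cellB tab lin coluna with
    | none => none
    | some u => if u = "m" ∨ u = " " then dropB tab coluna fuel (lin + 1) else some (lin, u)

-- def ray(r, c, dr, dc): return 0 if tabuleiro[r][c] != tipo else 1 + ray(r+dr, c+dc, dr, dc)
def rayB (tab : List (List String)) (tipo : String) (dr dc : Int) : Nat → Int → Int → Option Int
  | 0, _, _ => none
  | fuel+1, r, c =>
    match cellB tab r c with
    | none => none
    | some u => if u ≠ tipo then some 0 else (rayB tab tipo dr dc fuel (r + dr) (c + dc)).map (· + 1)

-- the eight (dr, dc) of the table comprehension, in its iteration order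
def dirsB : List (Int × Int) := [(-1,-1), (-1,0), (-1,1), (0,-1), (0,1), (1,-1), (1,0), (1,1)]

def pvMaxRowB (tab : List (List String)) : Nat := (tab.map List.length).foldr Nat.max 0

def conta_ligados_alt (tabuleiro : List (List String)) (coluna : Int) : Int :=
  match dropB tabuleiro coluna (tabuleiro.length + 2) 1 with
  | none => 0
  | some (lin, tipo) =>
    let fuel := 4 * (tabuleiro.length + pvMaxRowB tabuleiro) + 10
    -- stage 1: runs = {(dr,dc): ray(lin+dr, coluna+dc, dr, dc) for ...}
    let runs : Option (List ((Int × Int) × Int)) :=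
      dirsB.foldl (fun acc p => acc.bind (fun l =>
        (rayB tabuleiro tipo p.1 p.2 fuel (lin + p.1) (coluna + p.2)).map
          (fun v => l ++ [(p, v)]))) (some [])
    match runs with
    | none => 0
    | some l =>
      -- stage 2: 1 + max(runs[d] + runs[-d] for d in the four axes)
      let get := fun (p : Int × Int) => ((l.lookup p).getD 0)
      let sums := [((1:Int),(1:Int)), (-1,1), (1,0), (0,1)].map
        (fun p => get p + get (-p.1, -p.2))
      match sums with
      | [] => 0
      | s :: rest => 1 + rest.foldl max s

-- ===== PRECONDITION & SPEC =====
-- Pre_ holds exactly when Python A returns: the drop loop finds a piece in the column before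
-- running off the board, and each of the 8 rays from it meets a cell ≠ tipo while the (possibly
-- negative, Python-wraparound) indices are still in range; otherwise A raises IndexError.
def pvC (tab : List (List String)) (r c : Int) : Option String :=
  (PySem.List.pyGet? tab r).bind (fun row => PySem.List.pyGet? row c)
def pvBlocked (o : Option String) : Bool :=
  match o with
  | some u => u = "m" || u = " "
  | none => false
def pvRayOK (tab : List (List String)) (coluna lin : Int) (tipo : String) (di dj : Int) (T : Nat) : Bool :=
  (List.range (T+1)).any (fun t =>
    decide (1 ≤ t) &&
    (match pvC tab (lin + di * t) (coluna + dj * t) with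
     | some u => u ≠ tipo
     | none => false) &&
    (List.range t).all (fun s => decide (s = 0) || pvC tab (lin + di * s) (coluna + dj * s) == some tipo))
def pvMaxRowP (tab : List (List String)) : Nat := (tab.map List.length).foldr Nat.max 0
def preB (tab : List (List String)) (coluna : Int) : Bool :=
  (List.range tab.length).any (fun r =>
    decide (1 ≤ r) && !(pvBlocked (pvC tab r coluna)) && (pvC tab r coluna).isSome &&
    ((List.range r).all (fun r' => decide (r' = 0) || pvBlocked (pvC tab r' coluna))) &&
    ([((1:Int),(1:Int)), (-1,1), (1,0), (0,1), (-1,-1), (1,-1), (-1,0), (0,-1)].all (fun p =>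
        pvRayOK tab coluna r ((pvC tab r coluna).getD "") p.1 p.2
          (2 * (tab.length + pvMaxRowP tab) + 2))))

def Pre_conta_ligados (tabuleiro : List (List String)) (coluna : Int) : Prop :=
  preB tabuleiro coluna = true
instance (tabuleiro : List (List String)) (coluna : Int) : Decidable (Pre_conta_ligados tabuleiro coluna) := by
  unfold Pre_conta_ligados; infer_instance

def pvWitness_conta_ligados : List (List String) × Int :=
  ([["m","m","m","m"], ["m"," ","X","m"], ["m","X","X","m"], ["m","m","m","m"]], 2)

def Spec_conta_ligados (tabuleiro : List (List String)) (coluna : Int) (out : Int) : Prop := out = conta_ligados_alt tabuleiro coluna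
instance (tabuleiro : List (List String)) (coluna : Int) (out : Int) : Decidable (Spec_conta_ligados tabuleiro coluna out) := by unfold Spec_conta_ligados; infer_instance

-- ===== CLAIM (what is proved, stated in full; the proofs are below) =====
def Claim_equal_conta_ligados : Prop := ∀ (tabuleiro : List (List String)) (coluna : Int), Dom_conta_ligados tabuleiro coluna → Pre_conta_ligados tabuleiro coluna → Spec_conta_ligados tabuleiro coluna (conta_ligados tabuleiro coluna)

-- ===== LEMMAS AND PROOFS =====

theorem cellB_eq_cellA : cellB = cellA := rfl
theorem pvC_eq_cellA : pvC = cellA := rfl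

theorem drop_eq (tab : List (List String)) (coluna : Int) :
    ∀ fuel lin, dropB tab coluna fuel lin = dropA tab coluna fuel lin := by
  intro fuel
  induction fuel with
  | zero => intro lin; rfl
  | succ n ih =>
    intro lin
    simp only [dropA, dropB, cellB_eq_cellA]
    cases cellA tab lin coluna with
    | none => rfl
    | some u =>
      by_cases h : u = "m" ∨ u = " " <;> simp [h, ih]

-- drop loop characterisation: reaches the first unblocked row r and returns its cell
theorem dropA_spec (tab : List (List String)) (coluna : Int) (r : Nat) (tipo : String)
    (hblock : ∀ r' : Nat, 1 ≤ r' → r' < r → pvBlocked (cellA tab r' coluna) = true)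
    (hcell : cellA tab (r:Int) coluna = some tipo)
    (hnm : tipo ≠ "m") (hnv : tipo ≠ " ") :
    ∀ fuel (q : Nat), 1 ≤ q → q ≤ r → fuel ≥ r + 1 - q →
      dropA tab coluna fuel (q:Int) = some ((r:Int), tipo) := by
  intro fuel
  induction fuel with
  | zero => intro q h1 h2 h3; omega
  | succ n ih =>
    intro q h1 h2 h3
    rcases eq_or_lt_of_le h2 with he | hlt
    · subst he
      simp only [dropA, hcell]
      have : ¬ (tipo = "m" ∨ tipo = " ") := by simp [hnm, hnv]
      simp [this]
    · have hb := hblock q h1 hlt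
      have : ∃ u, cellA tab (q:Int) coluna = some u ∧ (u = "m" ∨ u = " ") := by
        cases hc : cellA tab (q:Int) coluna with
        | none => rw [hc] at hb; simp [pvBlocked] at hb
        | some u =>
          rw [hc] at hb; refine ⟨u, rfl, ?_⟩
          simpa [pvBlocked] using hb
      obtain ⟨u, hu, hum⟩ := this
      simp only [dropA, hu, if_pos hum]
      have hq1 : ((q:Int) + 1) = ((q+1 : Nat) : Int) := by push_cast; ring
      rw [hq1]
      exact ih (q+1) (by omega) (by omega) (by omega)

-- B's recursive ray: returns the number f of leading tipo-cells along its ray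
theorem rayB_spec (tab : List (List String)) (coluna lin : Int) (tipo : String)
    (di dj : Int) (f : Nat) (u : String)
    (hrun : ∀ s : Nat, 1 ≤ s → s ≤ f → cellB tab (lin + di * s) (coluna + dj * s) = some tipo)
    (hstop : cellB tab (lin + di * ((f:Int)+1)) (coluna + dj * ((f:Int)+1)) = some u)
    (hu : u ≠ tipo) :
    ∀ fuel (d : Nat), d ≤ f → fuel ≥ f + 1 - d →
      rayB tab tipo di dj fuel (lin + di * ((d:Int)+1)) (coluna + dj * ((d:Int)+1))
        = some ((f:Int) - d) := by
  intro fuel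
  induction fuel with
  | zero => intro d h1 h2; omega
  | succ n ih =>
    intro d hd hfuel
    rcases eq_or_lt_of_le hd with he | hlt
    · subst he
      simp only [rayB, hstop, if_pos hu]
      congr 1; omega
    · have hc := hrun (d+1) (by omega) (by omega)
      have e : (((d+1:Nat)):Int) = (d:Int)+1 := by push_cast; ring
      rw [e] at hc
      simp only [rayB, hc, ne_eq, not_true_eq_false, if_false]
      have e1 : lin + di * ((d:Int)+1) + di = lin + di * (((d+1:Nat):Int)+1) := by push_cast; ring
      have e2 : coluna + dj * ((d:Int)+1) + dj = coluna + dj * (((d+1:Nat):Int)+1) := by push_cast; ring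
      rw [e1, e2, ih (d+1) (by omega) (by omega)]
      simp only [Option.map_some, Option.some.injEq]
      push_cast
      ring

-- one direction of A's interleaved loop = 1 + forward run + backward run, then transition
theorem loopA_dir (tab : List (List String)) (coluna lin : Int) (tipo : String)
    (d di dj : Int) (f b : Nat) (uF uB : String)
    (hd4 : d ≤ 4)
    (Hinc : ∀ x y : Int, incA d x y = (x + di, y + dj))
    (hF : ∀ s : Nat, 1 ≤ s → s ≤ f → cellA tab (lin + di * s) (coluna + dj * s) = some tipo)
    (hFs : cellA tab (lin + di * ((f:Int)+1)) (coluna + dj * ((f:Int)+1)) = some uF)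
    (huF : uF ≠ tipo)
    (hB : ∀ s : Nat, 1 ≤ s → s ≤ b → cellA tab (lin + (-di) * s) (coluna + (-dj) * s) = some tipo)
    (hBs : cellA tab (lin + (-di) * ((b:Int)+1)) (coluna + (-dj) * ((b:Int)+1)) = some uB)
    (huB : uB ≠ tipo) :
    ∀ fuel (k : Nat), 1 ≤ k → k ≤ max f b + 1 → fuel ≥ max f b + 2 - k →
    ∀ maxLig : Int,
    loopA tab coluna lin tipo fuel d (di * k) (dj * k)
        (1 + ((min (k-1) f : Nat) : Int) + ((min (k-1) b : Nat) : Int)) maxLig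
        (decide (k - 1 ≤ b)) (decide (k - 1 ≤ f))
      = loopA tab coluna lin tipo (fuel - (max f b + 2 - k)) (d + 1)
          (incA (d+1) 0 0).1 (incA (d+1) 0 0).2 1
          (if 1 + (f:Int) + (b:Int) > maxLig then 1 + (f:Int) + (b:Int) else maxLig) true true := by
  intro fuel
  induction fuel with
  | zero => intro k h1 h2 h3 maxLig; omega
  | succ n ih =>
    intro k hk1 hk2 hfuel maxLig
    have esub : ∀ s : Int, lin - di * s = lin + (-di) * s := by intro s; ring
    have esub2 : ∀ s : Int, coluna - dj * s = coluna + (-dj) * s := by intro s; ring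
    -- forward probe
    have hfwd : stepA (cellA tab (lin + di * k) (coluna + dj * k)) tipo
        (1 + ((min (k-1) f : Nat) : Int) + ((min (k-1) b : Nat) : Int)) (decide (k - 1 ≤ f))
        = some (1 + ((min k f : Nat) : Int) + ((min (k-1) b : Nat) : Int), decide (k ≤ f)) := by
      by_cases hkf : k - 1 ≤ f
      · by_cases hkf2 : k ≤ f
        · rw [hF k hk1 hkf2]
          simp [stepA, hkf, hkf2]
          all_goals omega
        · have hk : k = f + 1 := by omega
          have e : ((k:Nat) : Int) = ((f:Int)+1) := by rw [hk]; push_cast; ring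
          rw [e, hFs]
          simp [stepA, hkf, huF, hkf2]
          all_goals omega
      · have h2 : ¬ (k ≤ f) := by omega
        simp [stepA, hkf, h2]
        all_goals omega
    have hbwd : stepA (cellA tab (lin - di * k) (coluna - dj * k)) tipo
        (1 + ((min k f : Nat) : Int) + ((min (k-1) b : Nat) : Int)) (decide (k - 1 ≤ b))
        = some (1 + ((min k f : Nat) : Int) + ((min k b : Nat) : Int), decide (k ≤ b)) := by
      rw [esub, esub2]
      by_cases hkb : k - 1 ≤ b
      · by_cases hkb2 : k ≤ b
        · rw [hB k hk1 hkb2]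
          simp [stepA, hkb, hkb2]
          all_goals omega
        · have hk : k = b + 1 := by omega
          have e : ((k:Nat) : Int) = ((b:Int)+1) := by rw [hk]; push_cast; ring
          rw [e, hBs]
          simp [stepA, hkb, huB, hkb2]
          all_goals omega
      · have h2 : ¬ (k ≤ b) := by omega
        simp [stepA, hkb, h2]
        all_goals omega
    rw [loopA, if_pos hd4, hfwd]
    dsimp only
    rw [hbwd]
    dsimp only
    by_cases hend : k = max f b + 1
    · -- both flags now false: transition to direction d+1
      have hf : ¬ (k ≤ f) := by omega
      have hb' : ¬ (k ≤ b) := by omega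
      have e1 : decide (k ≤ f) = false := by simp [hf]
      have e2 : decide (k ≤ b) = false := by simp [hb']
      rw [e1, e2]
      simp only [Bool.not_false, Bool.and_self, if_true]
      have hminf : min k f = f := by omega
      have hminb : min k b = b := by omega
      rw [hminf, hminb]
      have hfuel2 : n + 1 - (max f b + 2 - k) = n := by omega
      rw [hfuel2]
    · -- continue within direction d
      have hor : (k ≤ f) ∨ (k ≤ b) := by omega
      have hcond : (!decide (k ≤ b) && !decide (k ≤ f)) = false := by
        rcases hor with h | h <;> simp [h]
      rw [hcond]
      simp only [Bool.false_eq_true, if_false]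
      rw [Hinc]
      have e1 : di * (k:Int) + di = di * ((k+1 : Nat) : Int) := by push_cast; ring
      have e2 : dj * (k:Int) + dj = dj * ((k+1 : Nat) : Int) := by push_cast; ring
      rw [e1, e2]
      have IH := ih (k+1) (by omega) (by omega) (by omega) maxLig
      simp only [Nat.add_sub_cancel] at IH
      rw [IH]
      have : n - (max f b + 2 - (k+1)) = n + 1 - (max f b + 2 - k) := by omega
      rw [this]

-- starting a fresh direction (k = 1) in tidied form
theorem loopA_dir1 (tab : List (List String)) (coluna lin : Int) (tipo : String)
    (d di dj di' dj' : Int) (f b : Nat) (uF uB : String)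
    (hd4 : d ≤ 4)
    (Hinc : ∀ x y : Int, incA d x y = (x + di, y + dj))
    (hinc' : incA (d+1) 0 0 = (di', dj'))
    (hF : ∀ s : Nat, 1 ≤ s → s ≤ f → cellA tab (lin + di * s) (coluna + dj * s) = some tipo)
    (hFs : cellA tab (lin + di * ((f:Int)+1)) (coluna + dj * ((f:Int)+1)) = some uF)
    (huF : uF ≠ tipo)
    (hB : ∀ s : Nat, 1 ≤ s → s ≤ b → cellA tab (lin + (-di) * s) (coluna + (-dj) * s) = some tipo)
    (hBs : cellA tab (lin + (-di) * ((b:Int)+1)) (coluna + (-dj) * ((b:Int)+1)) = some uB)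
    (huB : uB ≠ tipo) :
    ∀ fuel (maxLig : Int), fuel ≥ max f b + 1 →
    loopA tab coluna lin tipo fuel d di dj 1 maxLig true true
      = loopA tab coluna lin tipo (fuel - (max f b + 1)) (d + 1) di' dj' 1
          (if 1 + (f:Int) + (b:Int) > maxLig then 1 + (f:Int) + (b:Int) else maxLig) true true := by
  intro fuel maxLig hfuel
  have H := loopA_dir tab coluna lin tipo d di dj f b uF uB hd4 Hinc hF hFs huF hB hBs huB
    fuel 1 (by omega) (by omega) (by omega) maxLig
  rw [hinc'] at H
  norm_num at H
  exact H

-- once direct exceeds 4 the loop returns maxLig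
theorem loopA_stop (tab : List (List String)) (coluna lin : Int) (tipo : String)
    (d i j lig maxLig : Int) (l r : Bool) (hd : ¬ d ≤ 4) :
    ∀ fuel, fuel ≥ 1 → loopA tab coluna lin tipo fuel d i j lig maxLig l r = some maxLig := by
  intro fuel hfuel
  cases fuel with
  | zero => omega
  | succ n => rw [loopA, if_neg hd]

-- a true pvRayOK yields the run length f and the stopping cell of that ray
theorem ray_elim (tab : List (List String)) (coluna lin : Int) (tipo : String)
    (di dj : Int) (T : Nat) (h : pvRayOK tab coluna lin tipo di dj T = true) :
    ∃ f : Nat, f + 1 ≤ T ∧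
      (∀ s : Nat, 1 ≤ s → s ≤ f → cellA tab (lin + di * s) (coluna + dj * s) = some tipo) ∧
      ∃ u, cellA tab (lin + di * ((f:Int)+1)) (coluna + dj * ((f:Int)+1)) = some u ∧ u ≠ tipo := by
  unfold pvRayOK at h
  rw [List.any_eq_true] at h
  obtain ⟨t, htm, hcond⟩ := h
  rw [List.mem_range] at htm
  simp only [Bool.and_eq_true, decide_eq_true_eq, List.all_eq_true] at hcond
  obtain ⟨⟨ht1, hstop⟩, hall⟩ := hcond
  refine ⟨t - 1, by omega, ?_, ?_⟩
  · intro s hs1 hs2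
    have := hall s (List.mem_range.mpr (by omega))
    have hs0 : ¬ (s = 0) := by omega
    rw [pvC_eq_cellA] at this
    simpa [hs0] using this
  · have e : (((t - 1 : Nat)) : Int) + 1 = (t : Int) := by omega
    rw [e]
    revert hstop
    cases hc : pvC tab (lin + di * t) (coluna + dj * t) with
    | none => intro hstop; simp at hstop
    | some u =>
      rw [pvC_eq_cellA] at hc
      intro hstop
      exact ⟨u, hc, by simpa using hstop⟩

-- the eight lookups into B's literal run table, reduced definitionally
theorem pvLook11 (v1 v2 v3 v4 v5 v6 v7 v8 : Int) :
    (List.lookup ((1:Int),(1:Int)) [(((-1:Int),(-1:Int)),v1), (((-1:Int),(0:Int)),v2), (((-1:Int),(1:Int)),v3), (((0:Int),(-1:Int)),v4), (((0:Int),(1:Int)),v5), (((1:Int),(-1:Int)),v6), (((1:Int),(0:Int)),v7), (((1:Int),(1:Int)),v8)]).getD 0 = v8 := rfl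
theorem pvLookm1m1 (v1 v2 v3 v4 v5 v6 v7 v8 : Int) :
    (List.lookup ((-1:Int),(-1:Int)) [(((-1:Int),(-1:Int)),v1), (((-1:Int),(0:Int)),v2), (((-1:Int),(1:Int)),v3), (((0:Int),(-1:Int)),v4), (((0:Int),(1:Int)),v5), (((1:Int),(-1:Int)),v6), (((1:Int),(0:Int)),v7), (((1:Int),(1:Int)),v8)]).getD 0 = v1 := rfl
theorem pvLookm11 (v1 v2 v3 v4 v5 v6 v7 v8 : Int) :
    (List.lookup ((-1:Int),(1:Int)) [(((-1:Int),(-1:Int)),v1), (((-1:Int),(0:Int)),v2), (((-1:Int),(1:Int)),v3), (((0:Int),(-1:Int)),v4), (((0:Int),(1:Int)),v5), (((1:Int),(-1:Int)),v6), (((1:Int),(0:Int)),v7), (((1:Int),(1:Int)),v8)]).getD 0 = v3 := rfl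
theorem pvLook1m1 (v1 v2 v3 v4 v5 v6 v7 v8 : Int) :
    (List.lookup ((1:Int),(-1:Int)) [(((-1:Int),(-1:Int)),v1), (((-1:Int),(0:Int)),v2), (((-1:Int),(1:Int)),v3), (((0:Int),(-1:Int)),v4), (((0:Int),(1:Int)),v5), (((1:Int),(-1:Int)),v6), (((1:Int),(0:Int)),v7), (((1:Int),(1:Int)),v8)]).getD 0 = v6 := rfl
theorem pvLook10 (v1 v2 v3 v4 v5 v6 v7 v8 : Int) :
    (List.lookup ((1:Int),(0:Int)) [(((-1:Int),(-1:Int)),v1), (((-1:Int),(0:Int)),v2), (((-1:Int),(1:Int)),v3), (((0:Int),(-1:Int)),v4), (((0:Int),(1:Int)),v5), (((1:Int),(-1:Int)),v6), (((1:Int),(0:Int)),v7), (((1:Int),(1:Int)),v8)]).getD 0 = v7 := rfl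
theorem pvLookm10 (v1 v2 v3 v4 v5 v6 v7 v8 : Int) :
    (List.lookup ((-1:Int),(0:Int)) [(((-1:Int),(-1:Int)),v1), (((-1:Int),(0:Int)),v2), (((-1:Int),(1:Int)),v3), (((0:Int),(-1:Int)),v4), (((0:Int),(1:Int)),v5), (((1:Int),(-1:Int)),v6), (((1:Int),(0:Int)),v7), (((1:Int),(1:Int)),v8)]).getD 0 = v2 := rfl
theorem pvLook01 (v1 v2 v3 v4 v5 v6 v7 v8 : Int) :
    (List.lookup ((0:Int),(1:Int)) [(((-1:Int),(-1:Int)),v1), (((-1:Int),(0:Int)),v2), (((-1:Int),(1:Int)),v3), (((0:Int),(-1:Int)),v4), (((0:Int),(1:Int)),v5), (((1:Int),(-1:Int)),v6), (((1:Int),(0:Int)),v7), (((1:Int),(1:Int)),v8)]).getD 0 = v5 := rfl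
theorem pvLook0m1 (v1 v2 v3 v4 v5 v6 v7 v8 : Int) :
    (List.lookup ((0:Int),(-1:Int)) [(((-1:Int),(-1:Int)),v1), (((-1:Int),(0:Int)),v2), (((-1:Int),(1:Int)),v3), (((0:Int),(-1:Int)),v4), (((0:Int),(1:Int)),v5), (((1:Int),(-1:Int)),v6), (((1:Int),(0:Int)),v7), (((1:Int),(1:Int)),v8)]).getD 0 = v4 := rfl

-- ===== VERDICT (by name: the statement is the Claim_ definition above) =====
set_option maxHeartbeats 2000000 in
theorem conta_ligados_spec : Claim_equal_conta_ligados := by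
  intro tab coluna hdom hpre
  unfold Spec_conta_ligados
  unfold Pre_conta_ligados preB at hpre
  rw [List.any_eq_true] at hpre
  obtain ⟨r, hrm, hr⟩ := hpre
  rw [List.mem_range] at hrm
  simp only [Bool.and_eq_true, decide_eq_true_eq, Bool.not_eq_true'] at hr
  obtain ⟨⟨⟨⟨hr1, hnb⟩, hsome⟩, hblk⟩, hrays⟩ := hr
  obtain ⟨tipo, hc⟩ := Option.isSome_iff_exists.mp hsome
  rw [hc] at hnb hrays
  simp only [Option.getD_some] at hrays
  have hnm : tipo ≠ "m" := by intro h; subst h; simp [pvBlocked] at hnb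
  have hnv : tipo ≠ " " := by intro h; subst h; simp [pvBlocked] at hnb
  have hblock : ∀ r' : Nat, 1 ≤ r' → r' < r → pvBlocked (cellA tab (r':Int) coluna) = true := by
    intro r' h1 h2
    rw [List.all_eq_true] at hblk
    have h := hblk r' (List.mem_range.mpr h2)
    rw [pvC_eq_cellA] at h
    have h0 : ¬ (r' = 0) := by omega
    simpa [h0] using h
  simp only [List.all_cons, List.all_nil, Bool.and_eq_true, and_true] at hrays
  obtain ⟨h1, h2, h3, h4, h5, h6, h7, h8⟩ := hrays
  obtain ⟨f1, hTf1, hF1, uF1, hFs1, huF1⟩ := ray_elim tab coluna r tipo 1 1 _ h1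
  obtain ⟨f2, hTf2, hF2, uF2, hFs2, huF2⟩ := ray_elim tab coluna r tipo (-1) 1 _ h2
  obtain ⟨f3, hTf3, hF3, uF3, hFs3, huF3⟩ := ray_elim tab coluna r tipo 1 0 _ h3
  obtain ⟨f4, hTf4, hF4, uF4, hFs4, huF4⟩ := ray_elim tab coluna r tipo 0 1 _ h4
  obtain ⟨b1, hTb1, hB1, uB1, hBs1, huB1⟩ := ray_elim tab coluna r tipo (-1) (-1) _ h5
  obtain ⟨b2, hTb2, hB2, uB2, hBs2, huB2⟩ := ray_elim tab coluna r tipo 1 (-1) _ h6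
  obtain ⟨b3, hTb3, hB3, uB3, hBs3, huB3⟩ := ray_elim tab coluna r tipo (-1) 0 _ h7
  obtain ⟨b4, hTb4, hB4, uB4, hBs4, huB4⟩ := ray_elim tab coluna r tipo 0 (-1) _ h8
  have hP : pvMaxRowP tab = pvMaxRowA tab := rfl
  have hPB : pvMaxRowB tab = pvMaxRowA tab := rfl
  -- A side: drop, then the four directions
  unfold conta_ligados conta_ligados_alt
  have hdrop := dropA_spec tab coluna r tipo hblock (by rw [← pvC_eq_cellA]; exact hc) hnm hnv
    (tab.length + 2) 1 (by omega) (by omega) (by omega)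
  norm_num at hdrop
  rw [drop_eq, hdrop]
  dsimp only
  have E1 := loopA_dir1 tab coluna r tipo 1 1 1 (-1) 1 f1 b1 uF1 uB1 (by norm_num)
    (by intro x y; norm_num [incA]) (by decide) hF1 hFs1 huF1 hB1 hBs1 huB1
  have E2 := loopA_dir1 tab coluna r tipo (1+1) (-1) 1 1 0 f2 b2 uF2 uB2 (by norm_num)
    (by intro x y; norm_num [incA, sub_eq_add_neg]) (by decide) hF2 hFs2 huF2 hB2 hBs2 huB2
  have E3 := loopA_dir1 tab coluna r tipo (1+1+1) 1 0 0 1 f3 b3 uF3 uB3 (by norm_num)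
    (by intro x y; norm_num [incA]) (by decide) hF3 hFs3 huF3 hB3 hBs3 huB3
  have E4 := loopA_dir1 tab coluna r tipo (1+1+1+1) 0 1 0 0 f4 b4 uF4 uB4 (by norm_num)
    (by intro x y; norm_num [incA]) (by decide) hF4 hFs4 huF4 hB4 hBs4 huB4
  rw [E1 (32 * (tab.length + pvMaxRowA tab) + 100) 1 (by omega)]
  rw [E2 (32 * (tab.length + pvMaxRowA tab) + 100 - (max f1 b1 + 1)) _ (by omega)]
  rw [E3 (32 * (tab.length + pvMaxRowA tab) + 100 - (max f1 b1 + 1) - (max f2 b2 + 1)) _ (by omega)]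
  rw [E4 (32 * (tab.length + pvMaxRowA tab) + 100 - (max f1 b1 + 1) - (max f2 b2 + 1)
        - (max f3 b3 + 1)) _ (by omega)]
  rw [loopA_stop tab coluna r tipo (1+1+1+1+1) 0 0 1 _ true true (by norm_num)
    (32 * (tab.length + pvMaxRowA tab) + 100 - (max f1 b1 + 1) - (max f2 b2 + 1)
      - (max f3 b3 + 1) - (max f4 b4 + 1)) (by omega)]
  -- B side: the eight unit rays, via rayB_spec at d = 0
  have R11 := rayB_spec tab coluna r tipo 1 1 f1 uF1 hF1 hFs1 huF1
    (4 * (tab.length + pvMaxRowB tab) + 10) 0 (by omega) (by omega)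
  have Rm1m1 := rayB_spec tab coluna r tipo (-1) (-1) b1 uB1 hB1 hBs1 huB1
    (4 * (tab.length + pvMaxRowB tab) + 10) 0 (by omega) (by omega)
  have Rm11 := rayB_spec tab coluna r tipo (-1) 1 f2 uF2 hF2 hFs2 huF2
    (4 * (tab.length + pvMaxRowB tab) + 10) 0 (by omega) (by omega)
  have R1m1 := rayB_spec tab coluna r tipo 1 (-1) b2 uB2 hB2 hBs2 huB2
    (4 * (tab.length + pvMaxRowB tab) + 10) 0 (by omega) (by omega)
  have R10 := rayB_spec tab coluna r tipo 1 0 f3 uF3 hF3 hFs3 huF3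
    (4 * (tab.length + pvMaxRowB tab) + 10) 0 (by omega) (by omega)
  have Rm10 := rayB_spec tab coluna r tipo (-1) 0 b3 uB3 hB3 hBs3 huB3
    (4 * (tab.length + pvMaxRowB tab) + 10) 0 (by omega) (by omega)
  have R01 := rayB_spec tab coluna r tipo 0 1 f4 uF4 hF4 hFs4 huF4
    (4 * (tab.length + pvMaxRowB tab) + 10) 0 (by omega) (by omega)
  have R0m1 := rayB_spec tab coluna r tipo 0 (-1) b4 uB4 hB4 hBs4 huB4
    (4 * (tab.length + pvMaxRowB tab) + 10) 0 (by omega) (by omega)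
  simp only [Nat.cast_zero, zero_add, mul_one, sub_zero, add_zero]
    at R11 Rm1m1 Rm11 R1m1 R10 Rm10 R01 R0m1
  simp only [dirsB, List.foldl_cons, List.foldl_nil, Option.bind_some, add_zero, neg_neg, neg_zero, Option.getD_some,
    R11, Rm1m1, Rm11, R1m1, R10, Rm10, R01, R0m1, Option.map_some,
    List.map_cons, List.map_nil, List.nil_append, List.cons_append]
  simp only [pvLook11, pvLookm1m1, pvLookm11, pvLook1m1, pvLook10, pvLookm10, pvLook01, pvLook0m1]
  simp only [max_def]
  split_ifs <;> omega
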